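-- pv_equiv track=rewrite | github.com/pypi-data/pypi-mirror-399 | packages/djb/djb-0.2.35-py3-none-any.whl/djb/secrets/core.py | is_valid_age_public_key
-- ===== SOURCE A (Python) =====
-- BECH32_CHARS = frozenset("023456789acdefghjklmnpqrstuvwxyz")
--
-- def is_valid_age_public_key(key: str) -> bool:
--     """Check if a string is a valid age public key.
--
--     Age public keys:
--     - Start with "age1"
--     - Are 62 characters long (Bech32 encoding)
--     - Contain only lowercase letters and digits (no 1, b, i, o to avoid confusion)
--
--     Args:
--         key: String to validate
--
--     Returns:
--         True if the key appears to be a valid age public key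
--     """
--     if not key.startswith("age1"):
--         return False
--
--     if len(key) != 62:
--         return False
--
--     # Check characters after "age1" prefix
--     for char in key[4:]:
--         if char not in BECH32_CHARS:
--             return False
--
--     return True
-- ===== SOURCE B (Python) =====
-- import re
--
-- _AGE_KEY_RE = re.compile(r"age1[023456789acdefghjklmnpqrstuvwxyz]{58}")
--
-- def is_valid_age_public_key(key: str) -> bool:
--     return bool(_AGE_KEY_RE.fullmatch(key))
-- ===== Notes on version B (the rewrite author's own statement) =====
-- stated objective: idiomatic
-- what changed: Replaces the imperative prefix/length/per-character-loop decomposition with a single precompiled regex fullmatch whose literal prefix, character class and {58} quantifier jointly enforce all three conditions.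
import Mathlib
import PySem

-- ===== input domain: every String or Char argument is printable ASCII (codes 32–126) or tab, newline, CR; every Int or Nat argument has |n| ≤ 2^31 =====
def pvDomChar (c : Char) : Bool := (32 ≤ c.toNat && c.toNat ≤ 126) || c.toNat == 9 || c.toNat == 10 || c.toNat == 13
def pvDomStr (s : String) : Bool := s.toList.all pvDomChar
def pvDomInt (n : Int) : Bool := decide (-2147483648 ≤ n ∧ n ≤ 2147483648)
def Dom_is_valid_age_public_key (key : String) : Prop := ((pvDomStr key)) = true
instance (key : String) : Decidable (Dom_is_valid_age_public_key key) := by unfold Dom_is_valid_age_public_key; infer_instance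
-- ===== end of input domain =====

-- B replaces A's imperative prefix/length/per-character-loop checks with a single regex
-- fullmatch of the fixed pattern age1[023456789acdefghjklmnpqrstuvwxyz]{58} (objective: idiomatic).

-- ===== PORT A =====
-- frozenset("023456789acdefghjklmnpqrstuvwxyz")
def BECH32_CHARS : PySem.Set Char := PySem.Set.ofList "023456789acdefghjklmnpqrstuvwxyz".toList

-- the for-loop over key[4:] with its early 'return False'
def pvALoop : List Char → Bool
  | [] => true
  | c :: rest => if !(PySem.Set.contains BECH32_CHARS c) then false else pvALoop rest

def is_valid_age_public_key (key : String) : Bool :=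
  if !(PySem.Str.startswith key "age1") then false
  else if PySem.Str.len key ≠ 62 then false
  else pvALoop (PySem.Str.slice key (some 4) none).toList

-- ===== PORT B =====
-- The compiled pattern age1[023456789acdefghjklmnpqrstuvwxyz]{58}, rendered as its sequence
-- of single-character classes (4 literals then 58 copies of the class); fullmatch on such a
-- pattern is exactly the consume-to-the-end matcher below (no backtracking is possible).
def pvPattern : List (List Char) :=
  ['a'] :: ['g'] :: ['e'] :: ['1'] :: List.replicate 58 "023456789acdefghjklmnpqrstuvwxyz".toList

def pvFullmatch : List (List Char) → List Char → Bool
  | [], [] => true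
  | p :: ps, c :: cs => p.contains c && pvFullmatch ps cs
  | _, _ => false

def is_valid_age_public_key_alt (key : String) : Bool :=
  pvFullmatch pvPattern key.toList

-- ===== PRECONDITION & SPEC =====
def Spec_is_valid_age_public_key (key : String) (out : Bool) : Prop := out = is_valid_age_public_key_alt key
instance (key : String) (out : Bool) : Decidable (Spec_is_valid_age_public_key key out) := by unfold Spec_is_valid_age_public_key; infer_instance

-- ===== CLAIM (what is proved, stated in full; the proofs are below) =====
def Claim_equal_is_valid_age_public_key : Prop := ∀ (key : String), Dom_is_valid_age_public_key key → Spec_is_valid_age_public_key key (is_valid_age_public_key key)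

-- ===== LEMMAS AND PROOFS =====

-- the frozenset literal's elements, as the plain character list of the class
theorem pvContains_bech (c : Char) :
    PySem.Set.contains BECH32_CHARS c
      = ("023456789acdefghjklmnpqrstuvwxyz".toList).contains c := by
  have h : BECH32_CHARS = "023456789acdefghjklmnpqrstuvwxyz".toList := by decide
  rw [h, PySem.Set.contains]

-- A's loop is an 'all' over the class
theorem pvALoop_eq_all (cs : List Char) :
    pvALoop cs = cs.all (fun c => ("023456789acdefghjklmnpqrstuvwxyz".toList).contains c) := by
  induction cs with
  | nil => rfl
  | cons c rest ih =>
      simp only [pvALoop, pvContains_bech, List.all_cons, ih]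
      by_cases h : ("023456789acdefghjklmnpqrstuvwxyz".toList).contains c = true <;> simp [h]

-- matching n copies of a class is a length check plus an 'all'
theorem pvFullmatch_replicate (p : List Char) (n : Nat) (cs : List Char) :
    pvFullmatch (List.replicate n p) cs
      = (decide (cs.length = n) && cs.all (fun c => p.contains c)) := by
  induction cs generalizing n with
  | nil => cases n <;> simp [pvFullmatch, List.replicate]
  | cons c rest ih =>
      cases n with
      | zero => simp [pvFullmatch, List.replicate]
      | succ m => simp [List.replicate_succ, pvFullmatch, ih m, Bool.and_left_comm]

-- Char '==' as a flipped decide, to line the two ports' tests up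
theorem pvBeq_comm (a b : Char) : (a == b) = decide (b = a) := by
  by_cases hab : b = a
  · subst hab; simp
  · simp [hab, beq_eq_false_iff_ne.mpr (fun e => hab e.symm)]

-- ===== VERDICT (by name: the statement is the Claim_ definition above) =====
theorem is_valid_age_public_key_spec : Claim_equal_is_valid_age_public_key := by
  intro key _
  unfold Spec_is_valid_age_public_key
  unfold is_valid_age_public_key is_valid_age_public_key_alt pvPattern
  rcases h : key.toList with _ | ⟨c1, cs1⟩
  · cases hsw : PySem.Str.startswith key "age1" <;>
      simp [hsw, PySem.Str.len, h, pvFullmatch]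
  rcases cs1 with _ | ⟨c2, cs2⟩
  · cases hsw : PySem.Str.startswith key "age1" <;>
      simp [hsw, PySem.Str.len, h, pvFullmatch]
  rcases cs2 with _ | ⟨c3, cs3⟩
  · cases hsw : PySem.Str.startswith key "age1" <;>
      simp [hsw, PySem.Str.len, h, pvFullmatch]
  rcases cs3 with _ | ⟨c4, cs4⟩
  · cases hsw : PySem.Str.startswith key "age1" <;>
      simp [hsw, PySem.Str.len, h, pvFullmatch]
  · -- key = c1::c2::c3::c4::cs4
    have hsw : PySem.Str.startswith key "age1"
        = (decide (c1 = 'a') && decide (c2 = 'g') && decide (c3 = 'e') && decide (c4 = '1')) := by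
      rw [show PySem.Str.startswith key "age1" = PySem.Chars.startswith key.toList "age1".toList
            from by simp]
      rw [h]
      simp [PySem.Chars.startswith, List.isPrefixOf,
        show "age1".toList = ['a','g','e','1'] from rfl, Bool.and_assoc, pvBeq_comm]
    have hlen : PySem.Str.len key = (cs4.length + 4 : Nat) := by
      simp [PySem.Str.len, h]; omega
    have hslice : (PySem.Str.slice key (some 4) none).toList = cs4 := by
      have h4 : ((4 : Int)) = ((4 : Nat) : Int) := by norm_num
      rw [PySem.Str.toList_slice, h, PySem.Chars.slice_eq_listSlice, h4,
        PySem.List.slice_from_natCast]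
      simp
    rw [hsw, hlen, hslice, pvALoop_eq_all]
    simp only [pvFullmatch, pvFullmatch_replicate, List.contains_cons, List.contains_nil,
      Bool.or_false, pvBeq_comm]
    set P := cs4.all (fun c => ("023456789acdefghjklmnpqrstuvwxyz".toList).contains c) with hP
    by_cases h1 : c1 = 'a' <;> by_cases h2 : c2 = 'g' <;> by_cases h3 : c3 = 'e' <;>
      by_cases h4 : c4 = '1' <;>
      simp [h1, h2, h3, h4,
        show (((cs4.length + 4 : Nat) : Int) ≠ 62) ↔ ¬ cs4.length = 58 from by omega] <;>
      by_cases hl : cs4.length = 58 <;> simp [hl] <;>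
      first
        | omega
        | (intro e; exact absurd e.symm (by assumption))
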